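-- pv_equiv track=rewrite | github.com/Lonsofore/InvertedIndex | invertedindexclient/utility.py | get_words_set
-- ===== SOURCE A (Python) =====
-- NOTSPLIT = ["'", '-']
--
-- def get_words_set(line):
--     words = set()
--     word = ''
--     for letter in line:
--         # if it's a letter  OR  it's an exception char after letter
--         if letter.isalpha() or (letter in NOTSPLIT and word != ''):
--             word += letter.lower()
--         else:
--             if word != '':
--                 words.add(word)
--             word = ''
--     if word != '':
--         words.add(word)
--     return words
-- ===== SOURCE B (Python) =====
-- NOTSPLIT = ["'", '-']
--
-- def get_words_set(line):
--     cleaned = ''.join(c.lower() if c.isalpha() or c in NOTSPLIT else ' ' for c in line)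
--     words = set()
--     for tok in cleaned.split():
--         tok = tok.lstrip("'-")
--         if tok:
--             words.add(tok)
--     return words
-- ===== Notes on version B (the rewrite author's own statement) =====
-- stated objective: simpler
-- what changed: Replaces A's per-character word-accumulation state machine with a map-to-spaces cleaning pass followed by str.split() and a per-token left-strip of leading apostrophe/hyphen characters, dropping tokens that become empty.
import Mathlib
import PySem

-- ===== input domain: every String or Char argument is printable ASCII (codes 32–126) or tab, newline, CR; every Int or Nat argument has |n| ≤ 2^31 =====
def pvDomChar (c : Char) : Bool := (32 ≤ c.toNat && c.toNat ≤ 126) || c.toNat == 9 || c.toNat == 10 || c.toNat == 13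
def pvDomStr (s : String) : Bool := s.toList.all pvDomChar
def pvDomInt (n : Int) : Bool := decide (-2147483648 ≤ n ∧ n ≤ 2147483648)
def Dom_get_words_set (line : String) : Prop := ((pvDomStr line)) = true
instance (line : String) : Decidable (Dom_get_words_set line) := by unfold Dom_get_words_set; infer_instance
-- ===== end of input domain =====

-- B replaces A's per-character word-accumulation state machine by a map-to-spaces pass,
-- str.split() and a per-token lstrip("'-"); objective: a simpler decomposition (same cost).

-- ===== PORT A =====
-- NOTSPLIT = ["'", '-'] is a list of 1-char strings and 'letter in NOTSPLIT' tests the current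
-- character, so it is ported as a List Char (exact on 1-char strings).
def pvNotsplit : List Char := ['\'', '-']

-- the loop body: state = (words, word); word kept as List Char (string concat on the list side)
def pvStepA (st : List String × List Char) (c : Char) : List String × List Char :=
  if PySem.Chars.isalpha c || (pvNotsplit.contains c && !st.2.isEmpty) then
    (st.1, st.2 ++ [PySem.Chars.lowerChar c])
  else
    (if !st.2.isEmpty then PySem.Set.add st.1 (String.ofList st.2) else st.1, [])

-- the trailing "if word != '': words.add(word)"
def pvFinishA (st : List String × List Char) : List String :=
  if !st.2.isEmpty then PySem.Set.add st.1 (String.ofList st.2) else st.1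

def get_words_set (line : String) : List String :=
  pvFinishA (line.toList.foldl pvStepA (([] : List String), ([] : List Char)))

-- ===== PORT B =====
-- c.lower() if c.isalpha() or c in NOTSPLIT else ' '
def pvClean (c : Char) : Char :=
  if PySem.Chars.isalpha c || pvNotsplit.contains c then PySem.Chars.lowerChar c else ' '

-- tok.lstrip("'-"): drop leading ' and - characters (exact: lstrip with a chars argument,
-- which PySem does not provide; ported by hand)
def pvLstripNS (t : List Char) : List Char :=
  t.dropWhile (fun c => c = '\'' || c = '-')

-- the "for tok in cleaned.split(): …" loop body
def pvStepB (s : List String) (t : List Char) : List String :=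
  let tok := pvLstripNS t
  if !tok.isEmpty then PySem.Set.add s (String.ofList tok) else s

def get_words_set_alt (line : String) : List String :=
  (PySem.Chars.split₀ (line.toList.map pvClean)).foldl pvStepB []

-- ===== PRECONDITION & SPEC =====
def Spec_get_words_set (line : String) (out : List String) : Prop := out = get_words_set_alt line
instance (line : String) (out : List String) : Decidable (Spec_get_words_set line out) := by unfold Spec_get_words_set; infer_instance

-- ===== CLAIM (what is proved, stated in full; the proofs are below) =====
def Claim_equal_get_words_set : Prop := ∀ (line : String), Dom_get_words_set line → Spec_get_words_set line (get_words_set line)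

-- ===== LEMMAS AND PROOFS =====

lemma pv_char_le {c d : Char} : (c ≤ d) ↔ c.toNat ≤ d.toNat := by
  rw [Char.le_def]; exact Iff.rfl

lemma pv_ofNat_toNat (n : Nat) (h : n < 55296) : (Char.ofNat n).toNat = n := by
  have hv : Nat.isValidChar n := Or.inl (by omega)
  unfold Char.ofNat
  rw [dif_pos hv]
  rfl

lemma pv_lower_alpha_range (c : Char) (h : PySem.Chars.isalpha c = true) :
    97 ≤ (PySem.Chars.lowerChar c).toNat ∧ (PySem.Chars.lowerChar c).toNat ≤ 122 := by
  unfold PySem.Chars.isalpha at h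
  unfold PySem.Chars.lowerChar
  rw [Bool.or_eq_true] at h
  rcases h with hu | hl
  · have hb := hu
    unfold PySem.Chars.isupper at hb
    rw [Bool.and_eq_true, decide_eq_true_iff, decide_eq_true_iff, pv_char_le, pv_char_le] at hb
    have h1 : ('A' : Char).toNat = 65 := by decide
    have h2 : ('Z' : Char).toNat = 90 := by decide
    rw [if_pos hu, pv_ofNat_toNat _ (by omega)]
    omega
  · have hb := hl
    unfold PySem.Chars.islower at hb
    rw [Bool.and_eq_true, decide_eq_true_iff, decide_eq_true_iff, pv_char_le, pv_char_le] at hb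
    have h1 : ('a' : Char).toNat = 97 := by decide
    have h2 : ('z' : Char).toNat = 122 := by decide
    have hu : PySem.Chars.isupper c = false := by
      unfold PySem.Chars.isupper
      rw [Bool.and_eq_false_iff]
      right; rw [decide_eq_false_iff_not, pv_char_le]
      have hZ : ('Z' : Char).toNat = 90 := by decide
      omega
    rw [if_neg (by simp [hu])]
    omega

lemma pv_char_ne_of_toNat {c d : Char} (h : c.toNat ≠ d.toNat) : c ≠ d := by
  intro he; exact h (by rw [he])

lemma pv_isspace_of_range (x : Char) (h1 : 33 ≤ x.toNat) (h2 : x.toNat ≤ 126) :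
    PySem.Chars.isspace x = false := by
  unfold PySem.Chars.isspace
  simp only [Bool.or_eq_false_iff, decide_eq_false_iff_not, Bool.and_eq_false_iff]
  omega

lemma pv_clean_ns (c : Char) (h : pvNotsplit.contains c = true) : pvClean c = c := by
  have hc : c = '\'' ∨ c = '-' := by
    simpa [pvNotsplit] using h
  unfold pvClean
  rw [if_pos (by rw [Bool.or_eq_true]; right; exact h)]
  unfold PySem.Chars.lowerChar
  rcases hc with rfl | rfl <;> rw [if_neg (by decide)]

lemma pv_isspace_clean (c : Char) :
    PySem.Chars.isspace (pvClean c)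
      = !(PySem.Chars.isalpha c || pvNotsplit.contains c) := by
  by_cases ha : PySem.Chars.isalpha c = true
  · have hr := pv_lower_alpha_range c ha
    unfold pvClean
    rw [if_pos (by simp [ha])]
    rw [pv_isspace_of_range _ (by omega) (by omega), ha]
    rfl
  · by_cases hq : pvNotsplit.contains c = true
    · have hc : c = '\'' ∨ c = '-' := by simpa [pvNotsplit] using hq
      rw [pv_clean_ns c hq, Bool.eq_false_iff.mpr ha, hq]
      rcases hc with rfl | rfl <;> decide
    · unfold pvClean
      rw [if_neg (by rw [Bool.or_eq_true]; rintro (h | h); exacts [ha h, hq h])]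
      rw [Bool.eq_false_iff.mpr ha, Bool.eq_false_iff.mpr hq]
      decide

lemma pv_lstrip_append_alpha (xs : List Char) (c : Char) (h : PySem.Chars.isalpha c = true) :
    pvLstripNS (xs ++ [PySem.Chars.lowerChar c]) = pvLstripNS xs ++ [PySem.Chars.lowerChar c] := by
  have hr := pv_lower_alpha_range c h
  have h1 : PySem.Chars.lowerChar c ≠ '\'' := pv_char_ne_of_toNat (by
    have : ('\'' : Char).toNat = 39 := by decide
    omega)
  have h2 : PySem.Chars.lowerChar c ≠ '-' := pv_char_ne_of_toNat (by
    have : ('-' : Char).toNat = 45 := by decide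
    omega)
  unfold pvLstripNS
  rw [List.dropWhile_append]
  split_ifs with hE
  · rw [List.isEmpty_iff] at hE
    rw [hE]
    simp [List.dropWhile, h1, h2]
  · rfl

lemma pv_lstrip_append_keep (xs : List Char) (a : Char) (h : (pvLstripNS xs).isEmpty = false) :
    pvLstripNS (xs ++ [a]) = pvLstripNS xs ++ [a] := by
  unfold pvLstripNS at *
  rw [List.dropWhile_append, if_neg (by simp [h])]

lemma pv_lstrip_append_ns (xs : List Char) (a : Char) (hq : pvNotsplit.contains a = true)
    (h : (pvLstripNS xs).isEmpty = true) : pvLstripNS (xs ++ [a]) = [] := by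
  have hc : a = '\'' ∨ a = '-' := by simpa [pvNotsplit] using hq
  unfold pvLstripNS at *
  rw [List.dropWhile_append, if_pos (by simp [h])]
  rcases hc with rfl | rfl <;> decide

lemma pv_go_acc (cs cur acc) :
    PySem.Chars.split₀.go cs cur acc
      = acc.reverse ++ PySem.Chars.split₀.go cs cur [] := by
  induction cs generalizing cur acc with
  | nil =>
    simp only [PySem.Chars.split₀.go]
    split_ifs <;> simp
  | cons c cs ih =>
    simp only [PySem.Chars.split₀.go]
    split_ifs with h1 h2
    · exact ih [] acc
    · rw [ih [] (cur.reverse :: acc), ih [] [cur.reverse]]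
      simp
    · exact ih (c :: cur) acc

lemma pv_main (cs : List Char) (cur : List Char) (ws : List String) :
    pvFinishA (cs.foldl pvStepA (ws, pvLstripNS cur.reverse))
      = (PySem.Chars.split₀.go (cs.map pvClean) cur []).foldl pvStepB ws := by
  induction cs generalizing cur ws with
  | nil =>
    simp only [List.foldl_nil, List.map_nil, PySem.Chars.split₀.go]
    split_ifs with h
    · rw [List.isEmpty_iff] at h
      subst h
      simp [pvFinishA, pvLstripNS]
    · simp only [List.reverse_cons, List.reverse_nil, List.nil_append, List.foldl_cons,
        List.foldl_nil]
      rfl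
  | cons c cs ih =>
    simp only [List.foldl_cons, List.map_cons, PySem.Chars.split₀.go]
    rw [pv_isspace_clean c]
    by_cases ha : PySem.Chars.isalpha c = true
    · -- alphabetic: both sides extend the current word
      rw [if_neg (by simp [ha])]
      have hc : pvClean c = PySem.Chars.lowerChar c := by
        unfold pvClean; rw [if_pos (by simp [ha])]
      have hstep : pvStepA (ws, pvLstripNS cur.reverse) c
          = (ws, pvLstripNS cur.reverse ++ [PySem.Chars.lowerChar c]) := by
        unfold pvStepA; rw [if_pos (by simp [ha])]
      rw [hstep, hc, ← pv_lstrip_append_alpha cur.reverse c ha]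
      have := ih (PySem.Chars.lowerChar c :: cur) ws
      simpa using this
    · by_cases hq : pvNotsplit.contains c = true
      · -- ' or -
        have hm : c ∈ pvNotsplit := by simpa using hq
        rw [if_neg (by simp [ha, hm])]
        have hc : pvClean c = c := pv_clean_ns c hq
        by_cases hw : (pvLstripNS cur.reverse).isEmpty = true
        · have hstep : pvStepA (ws, pvLstripNS cur.reverse) c = (ws, []) := by
            unfold pvStepA
            rw [if_neg (by simp [Bool.eq_false_iff.mpr ha, hw]), if_neg (by simp [hw]), List.isEmpty_iff.mp hw]
          rw [hstep, hc]
          have h2 : pvLstripNS ((c :: cur).reverse) = [] := by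
            simpa using pv_lstrip_append_ns cur.reverse c hq hw
          have := ih (c :: cur) ws
          rw [h2] at this
          simpa using this
        · have hlc : PySem.Chars.lowerChar c = c := by
            have := pv_clean_ns c hq
            unfold pvClean at this
            rwa [if_pos (by simp [hm])] at this
          have hstep : pvStepA (ws, pvLstripNS cur.reverse) c
              = (ws, pvLstripNS cur.reverse ++ [c]) := by
            unfold pvStepA
            rw [if_pos (by simp [hm, hw]), hlc]
          rw [hstep, hc]
          have h2 : pvLstripNS ((c :: cur).reverse) = pvLstripNS cur.reverse ++ [c] := by
            simpa using pv_lstrip_append_keep cur.reverse c (Bool.eq_false_iff.mpr hw)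
          have := ih (c :: cur) ws
          rw [h2] at this
          simpa using this
      · -- separator character
        have hnm : c ∉ pvNotsplit := by simpa using hq
        rw [if_pos (by simp [Bool.eq_false_iff.mpr ha, hnm])]
        have hstep : pvStepA (ws, pvLstripNS cur.reverse) c
            = (pvStepB ws cur.reverse, []) := by
          unfold pvStepA pvStepB
          rw [if_neg (by simp [Bool.eq_false_iff.mpr ha, hnm])]
        rw [hstep]
        have hbase := ih [] (pvStepB ws cur.reverse)
        simp only [List.reverse_nil] at hbase
        rw [show pvLstripNS [] = [] from rfl] at hbase
        split_ifs with hcur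
        · rw [List.isEmpty_iff] at hcur
          have hws : pvStepB ws cur.reverse = ws := by
            unfold pvStepB
            rw [hcur]
            simp [pvLstripNS]
          rw [hws] at hbase
          rw [hws]
          exact hbase
        · rw [pv_go_acc (cs.map pvClean) [] [cur.reverse]]
          simp only [List.reverse_cons, List.reverse_nil, List.nil_append, List.foldl_cons,
            List.singleton_append]
          exact hbase

-- ===== VERDICT (by name: the statement is the Claim_ definition above) =====
theorem get_words_set_spec : Claim_equal_get_words_set := by
  intro line _
  unfold Spec_get_words_set get_words_set get_words_set_alt PySem.Chars.split₀
  simpa [pvLstripNS] using pv_main line.toList [] []
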